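-- pv_equiv track=rewrite | github.com/muratovm/LeetCode-Solutions | 3024_type_of_triangle_2.py | triangleType
-- ===== SOURCE A (Python) =====
-- from typing import List
--
-- from collections import Counter
--
-- def triangleType(nums: List[int]) -> str:
--
--     #is triangle
--     side_1 = (nums[0] + nums[1]) > nums[2]
--     side_2 = (nums[1] + nums[2]) > nums[0]
--     side_3 = (nums[2] + nums[0]) > nums[1]
--
--     if side_1 and side_2 and side_3:
--         counter = Counter(nums)
--         for key in counter:
--             if counter[key] == 3:
--                 return "equilateral"
--             if counter[key] == 2:
--                 return "isosceles"
--         return "scalene"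
--     else:
--         return "none"
-- ===== SOURCE B (Python) =====
-- def triangleType(nums):
--     a, b, c = nums[0], nums[1], nums[2]
--     # triangle inequality in one arithmetic test: perimeter must exceed twice the largest side
--     if a + b + c <= 2 * max(a, b, c):
--         return "none"
--     # partition recursion: strip all copies of the leading value; its multiplicity decides
--     xs = list(nums)
--     while xs:
--         v = xs[0]
--         rest = [x for x in xs if x != v]
--         k = len(xs) - len(rest)
--         if k == 3:
--             return "equilateral"
--         if k == 2:
--             return "isosceles"
--         xs = rest
--     return "scalene"
-- ===== Notes on version B (the rewrite author's own statement) =====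
-- stated objective: alternative
-- what changed: Validity becomes one arithmetic test (perimeter > 2*max side) instead of three pairwise inequalities, and classification becomes a partition recursion that repeatedly strips every copy of the leading value and branches on how many were stripped, instead of building a Counter table and looping over its keys.
import Mathlib
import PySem

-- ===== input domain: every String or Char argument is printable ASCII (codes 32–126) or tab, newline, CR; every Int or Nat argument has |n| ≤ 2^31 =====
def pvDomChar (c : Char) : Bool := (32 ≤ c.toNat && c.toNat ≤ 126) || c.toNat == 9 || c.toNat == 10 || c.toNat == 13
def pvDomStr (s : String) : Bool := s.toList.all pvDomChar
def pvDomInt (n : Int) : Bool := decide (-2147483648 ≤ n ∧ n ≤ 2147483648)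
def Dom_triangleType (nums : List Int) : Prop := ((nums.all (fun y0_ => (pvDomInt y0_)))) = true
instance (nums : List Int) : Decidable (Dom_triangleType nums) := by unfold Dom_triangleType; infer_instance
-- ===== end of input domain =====

-- B replaces A's three pairwise inequalities by one arithmetic test (perimeter > 2*max side)
-- and A's Counter table + key loop by a partition recursion stripping the leading value
-- (objective: alternative; return value only, neither version mutates nums).

-- ===== PORT A =====
-- 'for key in counter: …' — keys in first-insertion order, counter[key] = getD
def pyLoop (counter : PySem.Dict Int Int) : List Int → String
  | [] => "scalene"
  | key :: rest =>
    if counter.getD key 0 == 3 then "equilateral"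
    else if counter.getD key 0 == 2 then "isosceles"
    else pyLoop counter rest

def triangleType (nums : List Int) : String :=
  let side1 := decide (PySem.List.pyGetD nums 0 0 + PySem.List.pyGetD nums 1 0 > PySem.List.pyGetD nums 2 0)
  let side2 := decide (PySem.List.pyGetD nums 1 0 + PySem.List.pyGetD nums 2 0 > PySem.List.pyGetD nums 0 0)
  let side3 := decide (PySem.List.pyGetD nums 2 0 + PySem.List.pyGetD nums 0 0 > PySem.List.pyGetD nums 1 0)
  if side1 && side2 && side3 then
    pyLoop (PySem.Dict.counter nums) (PySem.Dict.keys (PySem.Dict.counter nums))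
  else "none"

-- ===== PORT B =====
-- the while loop of Source B: strip all copies of the head; k copies stripped classifies
def bLoop : List Int → String
  | [] => "scalene"
  | v :: t =>
    let rest := (v :: t).filter (fun x => decide (x ≠ v))
    let k : Int := ((v :: t).length : Int) - (rest.length : Int)
    if k == 3 then "equilateral"
    else if k == 2 then "isosceles"
    else bLoop rest
termination_by xs => xs.length
decreasing_by
  simp only [List.filter_cons, ne_eq, not_true_eq_false, decide_false, List.length_cons]
  exact Nat.lt_succ_of_le (List.length_filter_le _ _)

def triangleType_alt (nums : List Int) : String :=
  let a := PySem.List.pyGetD nums 0 0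
  let b := PySem.List.pyGetD nums 1 0
  let c := PySem.List.pyGetD nums 2 0
  if a + b + c ≤ 2 * max (max a b) c then "none"
  else bLoop nums

-- ===== PRECONDITION & SPEC =====
-- A raises IndexError on nums[2] when len(nums) < 3 (B's nums[0..2] reads raise there too).
def Pre_triangleType (nums : List Int) : Prop := 3 ≤ nums.length
instance (nums : List Int) : Decidable (Pre_triangleType nums) := by unfold Pre_triangleType; infer_instance
def pvWitness_triangleType : List Int := [3, 4, 5]

def Spec_triangleType (nums : List Int) (out : String) : Prop := out = triangleType_alt nums
instance (nums : List Int) (out : String) : Decidable (Spec_triangleType nums out) := by unfold Spec_triangleType; infer_instance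

-- ===== CLAIM (what is proved, stated in full; the proofs are below) =====
def Claim_equal_triangleType : Prop := ∀ (nums : List Int), Dom_triangleType nums → Pre_triangleType nums → Spec_triangleType nums (triangleType nums)

-- ===== LEMMAS AND PROOFS =====

-- generic value scan both classification loops reduce to
def scanV (f : Int → Int) : List Int → String
  | [] => "scalene"
  | v :: rest =>
    if f v == 3 then "equilateral"
    else if f v == 2 then "isosceles"
    else scanV f rest

theorem pyLoop_eq_scanV (nums : List Int) (l : List Int) :
    pyLoop (PySem.Dict.counter nums) l = scanV (fun v => (nums.count v : Int)) l := by
  induction l with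
  | nil => rfl
  | cons k rest ih =>
    simp only [pyLoop, scanV, PySem.Dict.getD_counter, ih]

theorem scanV_congr_mem (f g : Int → Int) (l : List Int) (h : ∀ u ∈ l, f u = g u) :
    scanV f l = scanV g l := by
  induction l with
  | nil => rfl
  | cons v rest ih =>
    simp only [scanV, h v (List.mem_cons_self ..)]
    exact if_congr Iff.rfl rfl (if_congr Iff.rfl rfl (ih fun u hu => h u (List.mem_cons_of_mem _ hu)))

-- set(xs) commutes with filtering
theorem ofList_filter (p : Int → Bool) (l : List Int) :
    PySem.Set.ofList (l.filter p) = (PySem.Set.ofList l).filter p := by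
  induction l with
  | nil => rfl
  | cons x t ih =>
    rw [List.filter_cons, PySem.Set.ofList_cons]
    by_cases hx : p x = true
    · rw [if_pos hx, PySem.Set.ofList_cons, List.filter_cons, if_pos hx, ih]
      simp only [PySem.Set.discard, List.filter_filter]
      congr 1
      apply List.filter_congr
      intro a _
      rw [Bool.and_comm]
    · rw [if_neg hx, List.filter_cons, if_neg hx, ih]
      simp only [PySem.Set.discard, List.filter_filter]
      apply (List.filter_congr _).symm
      intro a _
      by_cases hax : a = x
      · subst hax; simp [hx]
      · simp [hax]

-- occurrences of v plus survivors of the ≠ v filter exhaust the list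
theorem count_add_filter (v : Int) (l : List Int) :
    l.count v + (l.filter (fun x => decide (x ≠ v))).length = l.length := by
  induction l with
  | nil => rfl
  | cons x t ih =>
    rw [List.filter_cons]
    by_cases h : x = v
    · subst h
      have hc : (x :: t).count x = t.count x + 1 := by simp [List.count_cons]
      rw [if_neg (by simp), hc, List.length_cons]
      omega
    · have hc : (x :: t).count v = t.count v := by simp [List.count_cons, h]
      rw [if_pos (by simpa using h), hc, List.length_cons, List.length_cons]
      omega

-- Int form used by the port comparison
theorem count_head_int (v : Int) (l : List Int) :
    (l.count v : Int) = (l.length : Int) - ((l.filter (fun x => decide (x ≠ v))).length : Int) := by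
  have := count_add_filter v l
  omega

-- counts of surviving values are unchanged by stripping v
theorem count_filter_ne (u v : Int) (huv : u ≠ v) (l : List Int) :
    (l.filter (fun x => decide (x ≠ v))).count u = l.count u := by
  induction l with
  | nil => rfl
  | cons x t ih =>
    rw [List.filter_cons]
    by_cases hx : x = v
    · subst hx
      rw [if_neg (by simp), ih]
      have hxu : ¬ x = u := fun e => huv (Eq.symm e)
      have hc : (x :: t).count u = t.count u := by
        simp [List.count_cons, hxu]
      rw [hc]
    · rw [if_pos (by simpa using hx), List.count_cons, List.count_cons, ih]

-- one unfolding of Source B's while loop, lets zeta-reduced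
theorem bLoop_cons (v : Int) (t : List Int) :
    bLoop (v :: t)
      = (if (((v :: t).length : Int) - (((v :: t).filter (fun x => decide (x ≠ v))).length : Int)) == 3
          then "equilateral"
         else if (((v :: t).length : Int) - (((v :: t).filter (fun x => decide (x ≠ v))).length : Int)) == 2
          then "isosceles"
         else bLoop ((v :: t).filter (fun x => decide (x ≠ v)))) := by
  rw [bLoop]

-- the ≠ v filter skips the head
theorem filter_head (v : Int) (t : List Int) :
    (v :: t).filter (fun x => decide (x ≠ v)) = t.filter (fun x => decide (x ≠ v)) := by
  rw [List.filter_cons, if_neg (by simp)]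

-- the partition recursion computes the multiplicity scan over set(xs)
theorem bLoop_eq_aux : ∀ (n : Nat) (xs : List Int), xs.length ≤ n →
    bLoop xs = scanV (fun v => (xs.count v : Int)) (PySem.Set.ofList xs) := by
  intro n
  induction n with
  | zero =>
    intro xs h
    have hx : xs = [] := List.length_eq_zero_iff.mp (Nat.le_zero.mp h)
    subst hx
    rw [bLoop]
    rfl
  | succ n ih =>
    intro xs h
    cases xs with
    | nil => rw [bLoop]; rfl
    | cons v t =>
      rw [bLoop_cons, PySem.Set.ofList_cons]
      simp only [scanV]
      rw [← count_head_int v (v :: t)]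
      refine if_congr Iff.rfl rfl (if_congr Iff.rfl rfl ?_)
      have hlen : ((v :: t).filter (fun x => decide (x ≠ v))).length ≤ n := by
        rw [filter_head]
        have h2 := List.length_filter_le (fun x => decide (x ≠ v)) t
        simp only [List.length_cons] at h
        omega
      rw [ih _ hlen, filter_head, ofList_filter]
      have hd : PySem.Set.discard (PySem.Set.ofList t) v
          = (PySem.Set.ofList t).filter (fun x => decide (x ≠ v)) := by
        simp only [PySem.Set.discard]
        apply List.filter_congr
        intro a _
        simp only [ne_eq, decide_not]
        rfl
      rw [hd]
      apply scanV_congr_mem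
      intro u hu
      have huv : u ≠ v := by simpa using (List.mem_filter.mp hu).2
      have hvu : ¬ v = u := fun e => huv (Eq.symm e)
      have hcc : (t.filter (fun x => decide (x ≠ v))).count u = (v :: t).count u := by
        rw [count_filter_ne u v huv t]
        have h3 : (v :: t).count u = t.count u := by
          simp [List.count_cons, hvu]
        rw [h3]
      exact congrArg (fun m : Nat => (m : Int)) hcc

theorem bLoop_eq (xs : List Int) :
    bLoop xs = scanV (fun v => (xs.count v : Int)) (PySem.Set.ofList xs) :=
  bLoop_eq_aux xs.length xs (Nat.le_refl _)

-- ===== VERDICT (by name: the statement is the Claim_ definition above) =====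
theorem triangleType_spec : Claim_equal_triangleType := by
  intro nums _ _
  unfold Spec_triangleType triangleType triangleType_alt
  set a := PySem.List.pyGetD nums 0 0 with ha
  set b := PySem.List.pyGetD nums 1 0 with hb
  set c := PySem.List.pyGetD nums 2 0 with hc
  by_cases hv : a + b > c ∧ b + c > a ∧ c + a > b
  · rw [if_pos (by simp [hv.1, hv.2.1, hv.2.2]), if_neg (by omega)]
    rw [pyLoop_eq_scanV, PySem.Dict.keys_counter, bLoop_eq]
  · rw [if_neg (by simp only [Bool.and_eq_true, decide_eq_true_eq]; tauto),
      if_pos (by omega)]
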